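-- pv_equiv track=rewrite | github.com/FelixScriptLanguage/muma | 仿真cmd.py | getEndSpace
-- ===== SOURCE A (Python) =====
-- def getEndSpace(dm):#与上面得相反
--     dm = dm[::-1]
--     a = 0
--     for i in dm:
--         if i == ' ':
--             a += 1
--         elif i != ' ':
--             break
--     return a
-- ===== SOURCE B (Python) =====
-- def getEndSpace(dm):
--     return len(dm) - len(dm.rstrip(' '))
-- ===== Notes on version B (the rewrite author's own statement) =====
-- stated objective: idiomatic
-- what changed: Replaces the reverse-and-count loop with len(dm) - len(dm.rstrip(' ')): no reversal, no per-character loop in user code.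
import Mathlib
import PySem

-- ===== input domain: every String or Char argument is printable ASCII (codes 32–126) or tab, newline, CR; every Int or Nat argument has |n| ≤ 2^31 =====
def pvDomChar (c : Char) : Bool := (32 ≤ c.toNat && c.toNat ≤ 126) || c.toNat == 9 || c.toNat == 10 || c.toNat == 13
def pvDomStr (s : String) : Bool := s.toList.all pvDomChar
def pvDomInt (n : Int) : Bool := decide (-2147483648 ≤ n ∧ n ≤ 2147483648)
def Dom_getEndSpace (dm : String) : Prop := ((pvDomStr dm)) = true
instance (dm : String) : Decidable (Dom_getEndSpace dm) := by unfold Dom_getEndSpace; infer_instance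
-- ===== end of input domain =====

-- B computes len(dm) - len(dm.rstrip(' ')) instead of A's reverse-and-count loop (objective: idiomatic).

-- ===== PORT A =====
-- the for-loop over the reversed string: count leading spaces, break at the first non-space
def pvCountLoop : List Char → Int → Int
  | [], a => a
  | c :: rest, a => if c == ' ' then pvCountLoop rest (a + 1) else a

def getEndSpace (dm : String) : Int :=
  -- dm[::-1] is string reversal; ported as List.reverse on the code points (exact)
  pvCountLoop dm.toList.reverse 0

-- ===== PORT B =====
-- Python str.rstrip(' ') (remove trailing ' ' characters); PySem has no rstrip-with-chars,
-- ported by hand: drop the trailing spaces from the end (exact for the single-char argument ' ')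
def pvRstripSpace (cs : List Char) : List Char :=
  (cs.reverse.dropWhile (· == ' ')).reverse

def getEndSpace_alt (dm : String) : Int :=
  (dm.toList.length : Int) - (pvRstripSpace dm.toList).length

-- ===== PRECONDITION & SPEC =====
def Spec_getEndSpace (dm : String) (out : Int) : Prop := out = getEndSpace_alt dm
instance (dm : String) (out : Int) : Decidable (Spec_getEndSpace dm out) := by unfold Spec_getEndSpace; infer_instance

-- ===== CLAIM (what is proved, stated in full; the proofs are below) =====
def Claim_equal_getEndSpace : Prop := ∀ (dm : String), Dom_getEndSpace dm → Spec_getEndSpace dm (getEndSpace dm)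

-- ===== LEMMAS AND PROOFS =====
theorem pvCountLoop_eq_takeWhile (l : List Char) (a : Int) :
    pvCountLoop l a = a + (l.takeWhile (· == ' ')).length := by
  induction l generalizing a with
  | nil => simp [pvCountLoop]
  | cons c rest ih =>
    by_cases h : c == ' '
    · simp [pvCountLoop, h, ih]; ring
    · simp [pvCountLoop, h]

-- ===== VERDICT (by name: the statement is the Claim_ definition above) =====
theorem getEndSpace_spec : Claim_equal_getEndSpace := by
  intro dm _
  unfold Spec_getEndSpace getEndSpace getEndSpace_alt pvRstripSpace
  rw [pvCountLoop_eq_takeWhile]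
  have hlen : (dm.toList.reverse.takeWhile (· == ' ')).length
      + (dm.toList.reverse.dropWhile (· == ' ')).length = dm.toList.length := by
    rw [← List.length_append, List.takeWhile_append_dropWhile, List.length_reverse]
  simp only [List.length_reverse]
  omega
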